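-- pv_equiv track=rewrite | github.com/RichardBerutu23/Kriptograpy | Praktek pertemuan 3/Tugas2.1.prak3.py | permutasi_keliling
-- ===== SOURCE A (Python) =====
-- import itertools
--
-- def permutasi_keliling(data):
--     if len(data) <= 1:
--         return [data]
--     pertama = data[0]
--     hasil = []
--     for perm in itertools.permutations(data[1:]):
--         hasil.append([pertama] + list(perm))
--     return hasil
-- ===== SOURCE B (Python) =====
-- def permutasi_keliling(data):
--     if len(data) <= 1:
--         return [data]
--     # iterative worklist: each state = (partial permutation, remaining pool)
--     states = [([data[0]], data[1:])]
--     for _ in range(len(data) - 1):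
--         states = [(perm + [pool[i]], pool[:i] + pool[i + 1:])
--                   for (perm, pool) in states
--                   for i in range(len(pool))]
--     return [perm for (perm, _) in states]
-- ===== Notes on version B (the rewrite author's own statement) =====
-- stated objective: alternative
-- what changed: Replaces A's per-permutation iteration over itertools.permutations (recursive generator) with an iterative breadth-first worklist of (partial permutation, remaining pool) states expanded once per position, producing the same lexicographic-by-position order.
import Mathlib
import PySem

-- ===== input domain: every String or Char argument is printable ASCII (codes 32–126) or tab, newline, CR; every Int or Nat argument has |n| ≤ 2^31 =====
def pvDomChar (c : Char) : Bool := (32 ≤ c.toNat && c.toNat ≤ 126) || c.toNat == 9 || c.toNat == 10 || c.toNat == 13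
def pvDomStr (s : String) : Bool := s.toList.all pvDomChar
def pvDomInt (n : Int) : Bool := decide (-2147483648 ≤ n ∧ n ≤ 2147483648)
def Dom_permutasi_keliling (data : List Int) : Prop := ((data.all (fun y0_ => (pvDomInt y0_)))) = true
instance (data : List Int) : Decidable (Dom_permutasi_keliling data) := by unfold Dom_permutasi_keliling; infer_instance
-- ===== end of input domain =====

-- B replaces A's recursive itertools.permutations generator by an iterative worklist of
-- (partial permutation, remaining pool) states (objective: alternative decomposition, same cost).

-- ===== PORT A =====
-- itertools.permutations(l): standard recursive specification in lexicographic-by-position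
-- order — for each position i in order, l[i] first, followed by permutations of the rest.
def pvPicks : List Int → List (Int × List Int)
  | [] => []
  | x :: xs => (x, xs) :: (pvPicks xs).map (fun p => (p.1, x :: p.2))

def pvPermAux : Nat → List Int → List (List Int)
  | 0, _ => [[]]
  | n + 1, l => (pvPicks l).flatMap (fun p => (pvPermAux n p.2).map (fun q => p.1 :: q))

def pvPermutations (l : List Int) : List (List Int) := pvPermAux l.length l

def permutasi_keliling (data : List Int) : List (List Int) :=
  if data.length ≤ 1 then [data]
  else
    -- data[0]: in range here (length ≥ 2), so the default of pyGetD is unreachable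
    let pertama := PySem.List.pyGetD data 0 0
    (pvPermutations (PySem.List.slice data (some 1) none)).foldl
      (fun hasil perm => hasil ++ [pertama :: perm]) []

-- ===== PORT B =====
-- one expansion round of the worklist (the inner list comprehension of Source B);
-- pool[i] is in range (i < len(pool)), so the default of pyGetD is unreachable
def pvStep (states : List (List Int × List Int)) : List (List Int × List Int) :=
  states.flatMap (fun s =>
    (List.range s.2.length).map (fun (i : Nat) =>
      (s.1 ++ [PySem.List.pyGetD s.2 (i : Int) 0],
       PySem.List.slice s.2 none (some (i : Int)) ++
         PySem.List.slice s.2 (some ((i : Int) + 1)) none)))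

def permutasi_keliling_alt (data : List Int) : List (List Int) :=
  if data.length ≤ 1 then [data]
  else
    let states := [([PySem.List.pyGetD data 0 0], PySem.List.slice data (some 1) none)]
    ((List.range (data.length - 1)).foldl (fun st _ => pvStep st) states).map (fun s => s.1)

-- ===== PRECONDITION & SPEC =====
def Spec_permutasi_keliling (data : List Int) (out : List (List Int)) : Prop := out = permutasi_keliling_alt data
instance (data : List Int) (out : List (List Int)) : Decidable (Spec_permutasi_keliling data out) := by unfold Spec_permutasi_keliling; infer_instance

-- ===== CLAIM (what is proved, stated in full; the proofs are below) =====
def Claim_equal_permutasi_keliling : Prop := ∀ (data : List Int), Dom_permutasi_keliling data → Spec_permutasi_keliling data (permutasi_keliling data)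

-- ===== LEMMAS AND PROOFS =====

-- the clean form of one expansion round
def pvStepC (states : List (List Int × List Int)) : List (List Int × List Int) :=
  states.flatMap (fun s =>
    (List.range s.2.length).map (fun i => (s.1 ++ [s.2.getD i 0], s.2.eraseIdx i)))

theorem pvFlatMap_congr {α β : Type} (l : List α) (f g : α → List β)
    (h : ∀ x ∈ l, f x = g x) : l.flatMap f = l.flatMap g := by
  induction l with
  | nil => rfl
  | cons x xs ih => simp_all

theorem pvStep_eq : pvStep = pvStepC := by
  funext states
  unfold pvStep pvStepC
  refine pvFlatMap_congr _ _ _ ?_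
  intro s _
  refine List.map_congr_left ?_
  intro i _
  have hcast : ((i : Int) + 1) = (((i + 1 : Nat) : Int)) := by push_cast; ring
  rw [hcast, PySem.List.slice_to_natCast, PySem.List.slice_from_natCast,
    List.eraseIdx_eq_take_drop_succ]
  simp

theorem pvPicks_eq (l : List Int) :
    pvPicks l = (List.range l.length).map (fun i => (l.getD i 0, l.eraseIdx i)) := by
  induction l with
  | nil => simp [pvPicks]
  | cons x xs ih =>
      simp [pvPicks, ih, List.range_succ_eq_map, List.map_map, Function.comp]

theorem pvKey (n : Nat) (states : List (List Int × List Int))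
    (h : ∀ s ∈ states, s.2.length = n) :
    (pvStepC^[n] states).map (fun s => s.1)
      = states.flatMap (fun s => (pvPermAux n s.2).map (fun q => s.1 ++ q)) := by
  induction n generalizing states with
  | zero =>
      simp only [Function.iterate_zero, id_eq, pvPermAux, List.map_cons, List.map_nil]
      induction states with
      | nil => rfl
      | cons s ss ih => simp_all
  | succ n ih =>
      have hstep : ∀ s ∈ pvStepC states, s.2.length = n := by
        intro s' hs'
        unfold pvStepC at hs'
        obtain ⟨s, hs, hmem⟩ := List.mem_flatMap.mp hs'
        obtain ⟨i, hi, rfl⟩ := List.mem_map.mp hmem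
        have hi' : i < s.2.length := List.mem_range.mp hi
        have := h s hs
        simp only [List.length_eraseIdx]
        rw [if_pos hi']
        omega
      rw [Function.iterate_succ_apply, ih (pvStepC states) hstep]
      unfold pvStepC
      rw [List.flatMap_assoc]
      refine pvFlatMap_congr _ _ _ ?_
      intro s hs
      rw [List.flatMap_map, pvPermAux, List.map_flatMap, pvPicks_eq, List.flatMap_map]
      refine pvFlatMap_congr _ _ _ ?_
      intro i _
      simp [List.map_map, Function.comp_def, List.append_assoc]

theorem pvFoldIter {α : Type} (f : α → α) (n : Nat) (s : α) :
    (List.range n).foldl (fun st _ => f st) s = f^[n] s := by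
  induction n with
  | zero => simp
  | succ n ih =>
      rw [List.range_succ, List.foldl_append, ih, Function.iterate_succ_apply']
      rfl

-- ===== VERDICT (by name: the statement is the Claim_ definition above) =====
theorem permutasi_keliling_spec : Claim_equal_permutasi_keliling := by
  intro data _
  unfold Spec_permutasi_keliling permutasi_keliling permutasi_keliling_alt
  by_cases h : data.length <= 1
  · simp [h]
  · simp only [if_neg h]
    rw [PySem.List.foldl_append_singleton_eq_map, pvFoldIter, pvStep_eq,
      pvKey (data.length - 1) _ (by
        intro s hs
        simp only [List.mem_singleton] at hs
        subst hs
        simp [PySem.List.slice_from_one, List.length_tail])]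
    unfold pvPermutations
    simp [PySem.List.slice_from_one, List.length_tail]
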